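-- pv_equiv track=rewrite | github.com/greydoubt/COMPLEXITY_LAND | 15_np_wizard_spellbook.py | verify_wizard_spellbook
-- ===== SOURCE A (Python) =====
-- def verify_wizard_spellbook(spellbooks, wizards_order, target_sequence):
--     sequence = []
--
--     # Iterate through the wizards in the specified order
--     for wizard in wizards_order:
--         # Check if the wizard has a spellbook
--         if wizard in spellbooks:
--             spellbook = spellbooks[wizard]
--
--             # Select the next spell from the wizard's spellbook
--             if spellbook:
--                 spell = spellbook.pop(0)
--                 sequence.append(spell)
--
--         # Check if the current sequence matches the target sequence
--         if sequence == target_sequence: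
--             return "The desired sequence of spells can be created!"
--
--     # If the loop completes without finding a match, the sequence cannot be created
--     return "The desired sequence of spells cannot be created."
-- ===== SOURCE B (Python) =====
-- def verify_wizard_spellbook(spellbooks, wizards_order, target_sequence):
--     # Incremental prefix matcher: tracks only the matched-prefix length and a
--     # per-wizard cursor; returns as soon as a cast spell breaks the prefix.
--     # Matches A's RETURN VALUE only: A pops spells from the caller's spellbooks
--     # in place, B never mutates its arguments.
--     pos = {}          # how many spells each wizard has already cast
--     i = 0             # length of the matched prefix of target_sequence
--     n = len(target_sequence)
--     for wizard in wizards_order: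
--         book = spellbooks.get(wizard)
--         if book:
--             p = pos.get(wizard, 0)
--             if p < len(book):
--                 spell = book[p]
--                 pos[wizard] = p + 1
--                 if i < n and spell == target_sequence[i]:
--                     i += 1
--                 else:
--                     return "The desired sequence of spells cannot be created."
--         if i == n:
--             return "The desired sequence of spells can be created!"
--     return "The desired sequence of spells cannot be created."
-- ===== Notes on version B (the rewrite author's own statement) =====
-- stated objective: faster
-- what changed: Replaces A's repeated full-list comparison sequence == target_sequence (and its destructive pop(0) from each spellbook) with an incremental prefix matcher that keeps only the matched-prefix length and a per-wizard cursor, comparing just the newly cast spell and returning early on the first mismatch.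
import Mathlib
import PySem

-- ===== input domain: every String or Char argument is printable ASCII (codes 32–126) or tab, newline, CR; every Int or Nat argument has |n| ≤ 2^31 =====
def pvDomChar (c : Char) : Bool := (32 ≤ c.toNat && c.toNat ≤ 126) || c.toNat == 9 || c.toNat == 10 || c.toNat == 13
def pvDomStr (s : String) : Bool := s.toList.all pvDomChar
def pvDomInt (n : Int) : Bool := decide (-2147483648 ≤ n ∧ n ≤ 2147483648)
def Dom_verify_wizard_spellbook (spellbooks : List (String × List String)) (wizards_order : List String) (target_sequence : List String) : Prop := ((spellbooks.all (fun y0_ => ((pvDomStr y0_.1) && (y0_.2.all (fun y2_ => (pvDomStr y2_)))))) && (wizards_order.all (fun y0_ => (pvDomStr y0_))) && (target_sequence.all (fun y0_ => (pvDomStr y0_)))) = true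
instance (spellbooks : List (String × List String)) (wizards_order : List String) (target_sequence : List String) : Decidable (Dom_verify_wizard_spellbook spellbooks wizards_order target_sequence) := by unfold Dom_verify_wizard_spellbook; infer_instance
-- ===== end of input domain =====

-- B replaces A's repeated whole-list comparison (and destructive pop(0)) by an incremental
-- prefix matcher with a per-wizard cursor (objective: faster); equivalence is about the
-- RETURN value only — Python A pops spells from the caller's spellbooks in place, B does
-- not mutate its arguments.

-- ===== PORT A =====
-- the for-loop of A: state = (remaining wizards, mutated dict of spellbooks, sequence)
def pvA_loop (target : List String) (l : List String)
    (books : PySem.Dict String (List String)) (seq : List String) : String :=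
  match l with
  | [] => "The desired sequence of spells cannot be created."
  | wizard :: rest =>
    match books.get? wizard with
    | some (spell :: tail) =>        -- wizard in spellbooks, spellbook truthy: spell = spellbook.pop(0)
      let books' := books.insert wizard tail
      let seq' := seq ++ [spell]
      if seq' = target then "The desired sequence of spells can be created!"
      else pvA_loop target rest books' seq'
    | some [] =>                     -- wizard in spellbooks but spellbook empty
      if seq = target then "The desired sequence of spells can be created!"
      else pvA_loop target rest books seq
    | none =>                        -- wizard not in spellbooks
      if seq = target then "The desired sequence of spells can be created!"
      else pvA_loop target rest books seq

def verify_wizard_spellbook (spellbooks : List (String × List String)) (wizards_order : List String) (target_sequence : List String) : String :=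
  pvA_loop target_sequence wizards_order (PySem.Dict.ofList spellbooks) []

-- ===== PORT B =====
-- the for-loop of B: state = (remaining wizards, cursor dict pos, matched-prefix length i)
def pvB_loop (books : PySem.Dict String (List String)) (target : List String)
    (l : List String) (pos : PySem.Dict String Nat) (i : Nat) : String :=
  match l with
  | [] => "The desired sequence of spells cannot be created."
  | wizard :: rest =>
    match books.get? wizard with
    | some book =>
      if book = [] then              -- 'if book:' false
        if i = target.length then "The desired sequence of spells can be created!"
        else pvB_loop books target rest pos i
      else
        let p := pos.getD wizard 0
        if hp : p < book.length then
          let spell := book[p]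
          let pos' := pos.insert wizard (p + 1)
          if hi : i < target.length then
            if spell = target[i] then
              if i + 1 = target.length then "The desired sequence of spells can be created!"
              else pvB_loop books target rest pos' (i + 1)
            else "The desired sequence of spells cannot be created."
          else "The desired sequence of spells cannot be created."
        else                         -- wizard's book exhausted
          if i = target.length then "The desired sequence of spells can be created!"
          else pvB_loop books target rest pos i
    | none =>
      if i = target.length then "The desired sequence of spells can be created!"
      else pvB_loop books target rest pos i

def verify_wizard_spellbook_alt (spellbooks : List (String × List String)) (wizards_order : List String) (target_sequence : List String) : String :=
  pvB_loop (PySem.Dict.ofList spellbooks) target_sequence wizards_order PySem.Dict.empty 0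

-- ===== PRECONDITION & SPEC =====
def Spec_verify_wizard_spellbook (spellbooks : List (String × List String)) (wizards_order : List String) (target_sequence : List String) (out : String) : Prop := out = verify_wizard_spellbook_alt spellbooks wizards_order target_sequence
instance (spellbooks : List (String × List String)) (wizards_order : List String) (target_sequence : List String) (out : String) : Decidable (Spec_verify_wizard_spellbook spellbooks wizards_order target_sequence out) := by unfold Spec_verify_wizard_spellbook; infer_instance

-- ===== CLAIM (what is proved, stated in full; the proofs are below) =====
def Claim_equal_verify_wizard_spellbook : Prop := ∀ (spellbooks : List (String × List String)) (wizards_order : List String) (target_sequence : List String), Dom_verify_wizard_spellbook spellbooks wizards_order target_sequence → Spec_verify_wizard_spellbook spellbooks wizards_order target_sequence (verify_wizard_spellbook spellbooks wizards_order target_sequence)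

-- ===== LEMMAS AND PROOFS =====

-- once the accumulated sequence is no longer a prefix of the target, A can only return "cannot"
theorem pvA_stuck (target : List String) (l : List String)
    (books : PySem.Dict String (List String)) (seq : List String)
    (h : ¬ seq <+: target) :
    pvA_loop target l books seq = "The desired sequence of spells cannot be created." := by
  induction l generalizing books seq with
  | nil => simp [pvA_loop]
  | cons wizard rest ih =>
    simp only [pvA_loop]
    have hne : seq ≠ target := fun he => h (he ▸ List.prefix_refl target)
    cases hg : books.get? wizard with
    | none => simp [hne]; exact ih _ _ h
    | some b =>
      cases b with
      | nil => simp [hne]; exact ih _ _ h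
      | cons spell tail =>
        have h' : ¬ (seq ++ [spell]) <+: target := fun hp =>
          h ((List.prefix_append seq [spell]).trans hp)
        have hne' : seq ++ [spell] ≠ target := fun he => h' (he ▸ List.prefix_refl target)
        simp [hne']
        exact ih _ _ h'

-- simulation invariant: A's state (books, take i target) vs B's state (pos, i),
-- where A's current spellbooks are the original ones with pos-many spells dropped
theorem pvAB_loop_eq (books0 : PySem.Dict String (List String)) (target : List String)
    (l : List String) (booksA : PySem.Dict String (List String))
    (pos : PySem.Dict String Nat) (i : Nat)
    (hi : i ≤ target.length)
    (hrel : ∀ w, booksA.get? w = (books0.get? w).map (fun b => b.drop (pos.getD w 0))) :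
    pvA_loop target l booksA (target.take i) = pvB_loop books0 target l pos i := by
  induction l generalizing booksA pos i with
  | nil => simp [pvA_loop, pvB_loop]
  | cons wizard rest ih =>
    have htake : (target.take i = target) ↔ i = target.length := by
      constructor
      · intro h
        have := congrArg List.length h
        simp at this; omega
      · intro h; subst h; simp
    have hskip : (if target.take i = target then "The desired sequence of spells can be created!"
          else pvA_loop target rest booksA (target.take i))
        = (if i = target.length then "The desired sequence of spells can be created!"
          else pvB_loop books0 target rest pos i) := by
      by_cases hlen : i = target.length
      · rw [if_pos (htake.mpr hlen), if_pos hlen]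
      · rw [if_neg (fun h => hlen (htake.mp h)), if_neg hlen]
        exact ih booksA pos i hi hrel
    have hw := hrel wizard
    simp only [pvA_loop, pvB_loop]
    cases hg : books0.get? wizard with
    | none =>
      rw [hg] at hw; simp only [Option.map_none] at hw
      simp only [hw]
      exact hskip
    | some b0 =>
      rw [hg] at hw; simp only [Option.map_some] at hw
      set p := pos.getD wizard 0 with hpdef
      cases hd : b0.drop p with
      | nil =>
        rw [hd] at hw
        simp only [hw]
        by_cases hb0 : b0 = []
        · rw [if_pos hb0]
          exact hskip
        · have hple : b0.length ≤ p := by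
            by_contra hc
            push Not at hc
            have : b0.drop p ≠ [] := by
              intro h0
              have := List.drop_eq_nil_iff.mp h0
              omega
            exact this hd
          rw [if_neg hb0, dif_neg (by omega : ¬ p < b0.length)]
          exact hskip
      | cons spell tail =>
        rw [hd] at hw
        have hb0 : b0 ≠ [] := by
          intro h0; subst h0; simp at hd
        have hplt : p < b0.length := by
          by_contra hc
          push Not at hc
          rw [List.drop_eq_nil_iff.mpr (by omega)] at hd
          exact absurd hd (by simp)
        have hcd := List.getElem_cons_drop (as := b0) (i := p) hplt
        rw [hd] at hcd
        have hspell : b0[p] = spell := (List.cons_eq_cons.mp hcd).1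
        have htail : b0.drop (p + 1) = tail := (List.cons_eq_cons.mp hcd).2
        simp only [hw, if_neg hb0, dif_pos hplt, hspell]
        by_cases hil : i < target.length
        · rw [dif_pos hil]
          by_cases hsp : spell = target[i]
          · -- the cast spell extends the matched prefix
            have hseq : target.take i ++ [spell] = target.take (i + 1) := by
              rw [hsp, List.take_add_one, List.getElem?_eq_getElem hil]
              rfl
            have htake' : (target.take (i + 1) = target) ↔ i + 1 = target.length := by
              constructor
              · intro h
                have := congrArg List.length h
                simp at this; omega
              · intro h; rw [h]; simp
            rw [if_pos hsp, hseq]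
            by_cases hlen : i + 1 = target.length
            · rw [if_pos (htake'.mpr hlen), if_pos hlen]
            · rw [if_neg (fun h => hlen (htake'.mp h)), if_neg hlen]
              apply ih _ _ _ (by omega)
              intro w
              by_cases hweq : w = wizard
              · subst hweq
                rw [PySem.Dict.get?_insert_self, hg, PySem.Dict.getD_insert_self]
                simp [htail]
              · rw [PySem.Dict.get?_insert, PySem.Dict.getD_insert, if_neg hweq, if_neg hweq, hrel w]
          · -- mismatch: B answers "cannot"; A's sequence left the prefix for good
            rw [if_neg hsp]
            have hnp : ¬ (target.take i ++ [spell]) <+: target := by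
              intro hpref
              obtain ⟨t, ht⟩ := hpref
              apply hsp
              have hlentake : (target.take i).length = i := by simp; omega
              rw [List.append_assoc] at ht
              have : target[i] = (target.take i ++ ([spell] ++ t))[i]'(by simp; omega) :=
                List.getElem_of_eq ht.symm hil
              rw [this, List.getElem_append_right (by omega)]
              simp [hlentake]
            have hne : target.take i ++ [spell] ≠ target :=
              fun he => hnp (by rw [he])
            rw [if_neg hne]
            exact pvA_stuck _ _ _ _ hnp
        · -- i = target.length: the sequence outgrows the target, A can never match again
          rw [dif_neg hil]
          have hnp : ¬ (target.take i ++ [spell]) <+: target := by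
            intro hpref
            have := hpref.length_le
            have hieq : i = target.length := by omega
            simp [hieq] at this
          have hne : target.take i ++ [spell] ≠ target :=
            fun he => hnp (by rw [he])
          rw [if_neg hne]
          exact pvA_stuck _ _ _ _ hnp

-- ===== VERDICT (by name: the statement is the Claim_ definition above) =====
theorem verify_wizard_spellbook_spec : Claim_equal_verify_wizard_spellbook := by
  intro spellbooks wizards_order target_sequence _
  show verify_wizard_spellbook _ _ _ = verify_wizard_spellbook_alt _ _ _
  unfold verify_wizard_spellbook verify_wizard_spellbook_alt
  have := pvAB_loop_eq (PySem.Dict.ofList spellbooks) target_sequence wizards_order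
      (PySem.Dict.ofList spellbooks) PySem.Dict.empty 0
      (by omega)
      (by intro w; cases (PySem.Dict.ofList spellbooks).get? w <;> simp [PySem.Dict.getD_empty])
  simpa using this
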